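-- pv_equiv track=rewrite | github.com/miruts-xz/competitive-programming | contests/codeforces/752/Divan and a New Project.py | solve
-- ===== SOURCE A (Python) =====
-- def solve(n ,visits):
--     ans = [0]*(n+1)
--     building = [(visits[i], i+1) for i in range(n)]
--     building.sort(reverse=True)
--     cost = 0
--     l,r = -1, 1
--     for vt, ind in building:
--         if abs(l) < abs(r):
--             ans[ind] = l
--             cost += vt*2*abs(l)
--             l -= 1
--
--         else:
--             ans[ind] = r
--             cost += vt*2*abs(r)
--             r += 1
--
--     return [cost, *ans]
-- ===== SOURCE B (Python) =====
-- def solve(n, visits):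
--     keys = [(visits[i], i + 1) for i in range(n)]
--     ranks = [sum(1 for other in keys if other > k) for k in keys]
--     positions = [r // 2 + 1 if r % 2 == 0 else -(r // 2 + 1) for r in ranks]
--     cost = 2 * sum(v * (r // 2 + 1) for (v, _), r in zip(keys, ranks))
--     return [cost, 0] + positions
-- ===== Notes on version B (the rewrite author's own statement) =====
-- stated objective: alternative
-- what changed: Replaces A's sort followed by a stateful two-pointer sweep with a sort-free rank-counting algorithm: each building's position and cost share are computed in closed form from the number of strictly greater (visits, index) pairs.
-- outside the precondition, e.g. on solve(-2, []): A returns [0], B returns [0, 0]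
import Mathlib
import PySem

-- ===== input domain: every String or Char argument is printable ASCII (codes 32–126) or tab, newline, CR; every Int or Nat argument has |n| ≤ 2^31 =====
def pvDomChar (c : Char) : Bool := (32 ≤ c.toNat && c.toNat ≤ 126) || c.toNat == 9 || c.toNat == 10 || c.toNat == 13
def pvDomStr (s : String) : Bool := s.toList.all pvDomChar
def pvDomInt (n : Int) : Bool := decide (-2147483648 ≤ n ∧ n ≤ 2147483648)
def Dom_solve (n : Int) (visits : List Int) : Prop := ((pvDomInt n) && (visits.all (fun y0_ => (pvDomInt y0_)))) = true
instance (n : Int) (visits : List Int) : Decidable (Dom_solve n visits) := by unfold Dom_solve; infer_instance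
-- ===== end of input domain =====

-- B replaces A's sort-then-two-pointer sweep by a sort-free rank-counting algorithm:
-- each building's rank is the number of strictly greater (visits, index) pairs, its
-- position and cost share follow from that rank in closed form (alternative, not faster).

-- ===== PORT A =====
-- A's for-loop: state (ans, cost, l, r)
def solveLoopA : List (Int × Int) → List Int → Int → Int → Int → List Int × Int
  | [], ans, cost, _, _ => (ans, cost)
  | (vt, ind) :: rest, ans, cost, l, r =>
    if |l| < |r| then
      solveLoopA rest (PySem.List.pySetD ans ind l) (cost + vt * 2 * |l|) (l - 1) r
    else
      solveLoopA rest (PySem.List.pySetD ans ind r) (cost + vt * 2 * |r|) l (r + 1)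

def solve (n : Int) (visits : List Int) : List Int :=
  let ans := List.replicate (n + 1).toNat (0 : Int)
  let building := PySem.List.sorted2
      ((PySem.List.pyRange 0 n 1).map (fun i => (PySem.List.pyGetD visits i 0, i + 1)))
      (·.1) (·.2) true
  let p := solveLoopA building ans 0 (-1) 1
  p.2 :: p.1

-- ===== PORT B =====
-- Python tuple comparison 'a > b' on int pairs (strict lexicographic)
def pairGt (a b : Int × Int) : Bool := decide (b.1 < a.1) || (decide (a.1 = b.1) && decide (b.2 < a.2))

def solve_alt (n : Int) (visits : List Int) : List Int :=
  let keys := (PySem.List.pyRange 0 n 1).map (fun i => (PySem.List.pyGetD visits i 0, i + 1))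
  let ranks : List Int := keys.map (fun k => ((keys.countP (fun other => pairGt other k) : Nat) : Int))
  let positions := ranks.map (fun r =>
    if PySem.Int.mod r 2 = 0 then PySem.Int.floordiv r 2 + 1 else -(PySem.Int.floordiv r 2 + 1))
  let cost := 2 * ((keys.zip ranks).map (fun p => p.1.1 * (PySem.Int.floordiv p.2 2 + 1))).sum
  cost :: 0 :: positions

-- ===== PRECONDITION & SPEC =====
-- Pre_ excludes the inputs where A raises IndexError (n > len(visits)) and the degenerate
-- negative building counts n < 0, where A's '[0]*(n+1)' accidentally shrinks: there A
-- returns [0] while B returns [0, 0]; n < 0 is outside the task's natural domain.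
def Pre_solve (n : Int) (visits : List Int) : Prop := 0 ≤ n ∧ n ≤ (visits.length : Int)
instance (n : Int) (visits : List Int) : Decidable (Pre_solve n visits) := by unfold Pre_solve; infer_instance
def pvWitness_solve : Int × List Int := (3, [2, 1, 5])

def Spec_solve (n : Int) (visits : List Int) (out : List Int) : Prop := out = solve_alt n visits
instance (n : Int) (visits : List Int) (out : List Int) : Decidable (Spec_solve n visits out) := by unfold Spec_solve; infer_instance

-- ===== CLAIM (what is proved, stated in full; the proofs are below) =====
def Claim_equal_solve : Prop := ∀ (n : Int) (visits : List Int), Dom_solve n visits → Pre_solve n visits → Spec_solve n visits (solve n visits)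

-- ===== LEMMAS AND PROOFS =====

-- A's loop, rephrased over enumerate(building): rank parity replaces the l/r pointers.
def solveLoopE : List (Int × (Int × Int)) → List Int → Int → List Int × Int
  | [], ans, cost => (ans, cost)
  | (k, (vt, ind)) :: rest, ans, cost =>
    let mag := PySem.Int.floordiv k 2 + 1
    solveLoopE rest
      (PySem.List.pySetD ans ind (if PySem.Int.mod k 2 = 0 then mag else -mag))
      (cost + vt * 2 * mag)

lemma loopA_eq_loopE (bs : List (Int × Int)) :
    ∀ (k : Nat) (ans : List Int) (cost : Int),
      solveLoopA bs ans cost (-(1 + ((k / 2 : Nat) : Int))) (1 + (((k + 1) / 2 : Nat) : Int)) =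
      solveLoopE (PySem.List.enumerate bs (k : Int)) ans cost := by
  induction bs with
  | nil => intro k ans cost; simp [solveLoopA, PySem.List.enumerate, solveLoopE]
  | cons b rest ih =>
    obtain ⟨vt, ind⟩ := b
    intro k ans cost
    rw [PySem.List.enumerate_cons]
    simp only [solveLoopA, solveLoopE]
    have hfd : PySem.Int.floordiv (k : Int) 2 = ((k / 2 : Nat) : Int) := by
      exact_mod_cast PySem.Int.floordiv_natCast k 2
    have hmd : PySem.Int.mod (k : Int) 2 = ((k % 2 : Nat) : Int) := by
      exact_mod_cast PySem.Int.mod_natCast k 2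
    have habsl : |(-(1 + ((k / 2 : Nat) : Int)))| = 1 + ((k / 2 : Nat) : Int) := by
      rw [abs_neg, abs_of_nonneg (by positivity)]
    have habsr : |(1 + (((k + 1) / 2 : Nat) : Int))| = 1 + (((k + 1) / 2 : Nat) : Int) := by
      rw [abs_of_nonneg (by positivity)]
    rw [habsl, habsr, hfd, hmd]
    have hk1 : ((k : Int) + 1) = ((k + 1 : Nat) : Int) := by push_cast; ring
    rcases Nat.even_or_odd k with he | ho
    · obtain ⟨m, hm⟩ := he
      have h1 : k / 2 = m := by omega
      have h2 : (k + 1) / 2 = m := by omega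
      have hmod : k % 2 = 0 := by omega
      have h4 : (k + 1 + 1) / 2 = m + 1 := by omega
      rw [if_neg (by rw [h1, h2]; omega), if_pos (by rw [hmod]; norm_num), h1, h2]
      have := ih (k + 1) (PySem.List.pySetD ans ind (1 + (m : Int)))
        (cost + vt * 2 * (1 + (m : Int)))
      rw [h2, h4] at this
      rw [hk1]
      convert this using 2 <;> congr 1 <;> ring
    · obtain ⟨m, hm⟩ := ho
      have h1 : k / 2 = m := by omega
      have h2 : (k + 1) / 2 = m + 1 := by omega
      have hmod : k % 2 = 1 := by omega
      have h4 : (k + 1 + 1) / 2 = m + 1 := by omega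
      rw [if_pos (by rw [h1, h2]; omega), if_neg (by rw [hmod]; norm_num), h1, h2]
      have := ih (k + 1) (PySem.List.pySetD ans ind (-(1 + (m : Int))))
        (cost + vt * 2 * (1 + (m : Int)))
      rw [h2, h4] at this
      rw [hk1]
      convert this using 2 <;> congr 1 <;> (try push_cast) <;> ring

def posOf (k : Int) : Int :=
  if PySem.Int.mod k 2 = 0 then PySem.Int.floordiv k 2 + 1 else -(PySem.Int.floordiv k 2 + 1)

def scatterStep (a : List Int) (e : Int × (Int × Int)) : List Int :=
  PySem.List.pySetD a e.2.2 (posOf e.1)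

-- the enumerate-loop is a scatter plus a sum
lemma loopE_eq (es : List (Int × (Int × Int))) :
    ∀ (ans : List Int) (cost : Int),
      solveLoopE es ans cost =
        (es.foldl scatterStep ans,
         cost + (es.map (fun e => e.2.1 * 2 * (PySem.Int.floordiv e.1 2 + 1))).sum) := by
  induction es with
  | nil => intro ans cost; simp [solveLoopE]
  | cons e rest ih =>
    obtain ⟨k, vt, ind⟩ := e
    intro ans cost
    simp only [solveLoopE, ih, List.foldl_cons, List.map_cons, List.sum_cons, scatterStep, posOf]
    simp only [Prod.mk.injEq]
    exact ⟨trivial, by ring⟩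

-- pairGt is the strict lexicographic order
lemma pairGt_eq_lt (a b : Int × Int) : pairGt a b = decide (toLex b < toLex a) := by
  by_cases h1 : b.1 < a.1
  · simp [pairGt, h1, Prod.Lex.lt_iff]
  · by_cases h2 : a.1 = b.1
    · by_cases h3 : b.2 < a.2 <;>
        simp [pairGt, h2, h3, Prod.Lex.lt_iff]
    · simp [pairGt, h1, h2, Prod.Lex.lt_iff, Ne.symm h2]

-- A's sorted2 with tuple key is sorting by the lexicographic key
lemma sorted2_eq_sorted_lex (xs : List (Int × Int)) :
    PySem.List.sorted2 xs (·.1) (·.2) true = PySem.List.sorted xs (fun p => toLex p) true := by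
  show xs.foldl (fun acc x => PySem.List.insertBy _ x acc) [] =
       xs.foldl (fun acc x => PySem.List.insertBy _ x acc) []
  congr 1
  funext acc x
  congr 1
  funext a b
  have : (decide (b.1 < a.1) || (!decide (a.1 < b.1) && decide (b.2 < a.2))) =
      decide (toLex b < toLex a) := by
    by_cases h1 : b.1 < a.1
    · simp [h1, Prod.Lex.lt_iff]
    · by_cases h2 : a.1 < b.1
      · simp [h1, h2, Prod.Lex.lt_iff]
        omega
      · have h3 : b.1 = a.1 := by omega
        by_cases h4 : b.2 < a.2 <;> simp [h3, h4, Prod.Lex.lt_iff]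
  exact this

-- rank characterisation: in a strictly descending list, the element at index k
-- has exactly k strictly greater elements
lemma countP_gt_of_pairwise {α κ : Type} [LinearOrder κ] (f : α → κ) :
    ∀ (l : List α), l.Pairwise (fun a b => f b < f a) →
      ∀ (k : Nat) (hk : k < l.length),
        l.countP (fun y => decide (f l[k] < f y)) = k := by
  intro l
  induction l with
  | nil => intro _ k hk; simp at hk
  | cons x t ih =>
    intro hp k hk
    rw [List.pairwise_cons] at hp
    obtain ⟨hx, ht⟩ := hp
    cases k with
    | zero =>
      simp only [List.getElem_cons_zero]
      rw [List.countP_eq_zero]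
      intro a ha
      simp only [decide_eq_true_eq]
      rcases List.mem_cons.mp ha with rfl | hat
      · exact lt_irrefl _
      · exact not_lt_of_gt (hx a hat)
    | succ k =>
      simp only [List.getElem_cons_succ]
      have hkt : k < t.length := by simpa using Nat.lt_of_succ_lt_succ hk
      have hlt : f t[k] < f x := hx _ (List.getElem_mem hkt)
      simp [hlt]
      exact ih ht k hkt

-- scatter at indices all different from j leaves position j alone
lemma scatter_untouched (j : Nat) :
    ∀ (es : List (Int × (Int × Int))) (ans : List Int),
      (∀ e ∈ es, 0 ≤ e.2.2) → (∀ e ∈ es, e.2.2 ≠ (j : Int)) →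
      (es.foldl scatterStep ans)[j]? = ans[j]? := by
  intro es
  induction es with
  | nil => intro ans _ _; rfl
  | cons e rest ih =>
    intro ans hnn hne
    rw [List.foldl_cons, ih _ (fun e' h => hnn e' (List.mem_cons_of_mem _ h))
        (fun e' h => hne e' (List.mem_cons_of_mem _ h))]
    have h0 : 0 ≤ e.2.2 := hnn e (List.mem_cons_self ..)
    rw [scatterStep, PySem.List.pySetD_of_nonneg _ _ h0, List.getElem?_set_ne]
    have := hne e (List.mem_cons_self ..)
    omega

lemma scatter_length : ∀ (es : List (Int × (Int × Int))) (ans : List Int),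
    (es.foldl scatterStep ans).length = ans.length := by
  intro es
  induction es with
  | nil => intro ans; rfl
  | cons e rest ih =>
    intro ans
    rw [List.foldl_cons, ih, scatterStep, PySem.List.length_pySetD]

-- scatter with pairwise-distinct in-range indices: position j receives its entry's value
lemma scatter_hit (j : Nat) :
    ∀ (es : List (Int × (Int × Int))) (ans : List Int) (e : Int × (Int × Int)),
      e ∈ es → e.2.2 = (j : Int) →
      (es.map (fun e => e.2.2)).Nodup →
      (∀ e' ∈ es, 0 ≤ e'.2.2 ∧ e'.2.2 < (ans.length : Int)) →
      (es.foldl scatterStep ans)[j]? = some (posOf e.1) := by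
  intro es
  induction es with
  | nil => intro ans e h; simp at h
  | cons e0 rest ih =>
    intro ans e hmem hej hnd hrange
    rw [List.map_cons, List.nodup_cons] at hnd
    obtain ⟨hnd0, hndr⟩ := hnd
    rcases List.mem_cons.mp hmem with rfl | hr
    · -- the head writes j; the rest never touches it
      rw [List.foldl_cons]
      rw [scatter_untouched j rest _
          (fun e' h => (hrange e' (List.mem_cons_of_mem _ h)).1)
          (fun e' h => by
            intro hc
            exact hnd0 (List.mem_map.mpr ⟨e', h, by rw [hc, ← hej]⟩))]
      obtain ⟨h0, hlen⟩ := hrange e (List.mem_cons_self ..)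
      rw [scatterStep, PySem.List.pySetD_of_nonneg _ _ h0]
      have hjt : e.2.2.toNat = j := by omega
      rw [hjt, List.getElem?_set_self (by omega)]
    · rw [List.foldl_cons]
      refine ih _ e hr hej hndr (fun e' h => ?_)
      rw [scatterStep, PySem.List.length_pySetD]
      exact hrange e' (List.mem_cons_of_mem _ h)

-- congruence for a map over enumerate when the index is determined by the element
lemma map_enumerate_congr {β : Type} (F : Int → (Int × Int) → β) (g : (Int × Int) → β) :
    ∀ (l : List (Int × Int)) (s : Nat),
      (∀ (k : Nat) (hk : k < l.length), F ((s + k : Nat) : Int) l[k] = g l[k]) →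
      (PySem.List.enumerate l (s : Int)).map (fun e => F e.1 e.2) = l.map g := by
  intro l
  induction l with
  | nil => intro s _; rfl
  | cons x t ih =>
    intro s h
    rw [PySem.List.enumerate_cons, List.map_cons, List.map_cons]
    congr 1
    · have := h 0 (by simp)
      simpa using this
    · have : ((s : Int) + 1) = ((s + 1 : Nat) : Int) := by push_cast; ring
      rw [this]
      refine ih (s + 1) (fun k hk => ?_)
      have := h (k + 1) (by simpa using Nat.succ_lt_succ hk)
      simpa [Nat.add_assoc, Nat.add_comm 1 k] using this

-- the main equivalence, for nonnegative n
lemma solve_eq_alt (n : Int) (visits : List Int) (hn0 : 0 ≤ n) :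
    solve n visits = solve_alt n visits := by
  -- names for the shared pieces
  set m := n.toNat with hm
  have hnm : (m : Int) = n := Int.toNat_of_nonneg hn0
  set f : Int → Int × Int := fun i => (PySem.List.pyGetD visits i 0, i + 1) with hf
  set keys := (PySem.List.pyRange 0 n 1).map f with hkeys
  have hkeysN : keys = (List.range m).map (fun j : Nat => f (j : Int)) := by
    rw [hkeys, ← hnm, PySem.List.pyRange_zero_natCast, List.map_map]
    rfl
  have hkeylen : keys.length = m := by rw [hkeysN, List.length_map, List.length_range]
  have hkeyget : ∀ (i : Nat) (hi : i < m), keys[i]'(by omega) = f (i : Int) := by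
    intro i hi
    simp [hkeysN]
  set building := PySem.List.sorted2 keys (·.1) (·.2) true with hbuilding
  have hbs : building = PySem.List.sorted keys (fun p => toLex p) true :=
    sorted2_eq_sorted_lex keys
  have hperm : building.Perm keys := by rw [hbs]; exact PySem.List.sorted_perm ..
  have hsndnodup : (keys.map (fun y => y.2)).Nodup := by
    rw [hkeysN, List.map_map]
    refine List.Nodup.map ?_ (List.nodup_range)
    intro a b hab
    simp only [Function.comp, hf] at hab
    omega
  have hnodup : building.Nodup := by
    refine (hperm.nodup_iff).mpr ?_
    exact (List.Nodup.of_map _ hsndnodup)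
  have hstrict : building.Pairwise (fun a b => toLex b < toLex a) := by
    have hle : building.Pairwise (fun a b => toLex b ≤ toLex a) := by
      rw [hbs]; exact PySem.List.sorted_pairwise_rev ..
    refine (hle.and hnodup).imp ?_
    rintro a b ⟨h1, h2⟩
    exact lt_of_le_of_ne h1 (fun hc => h2 (by simpa using hc.symm))
  -- the rank function
  set R : Int × Int → Nat := fun y => keys.countP (fun other => pairGt other y) with hR
  have hrank : ∀ (k : Nat) (hk : k < building.length), R (building[k]'hk) = k := by
    intro k hk
    simp only [hR]
    have h1 : keys.countP (fun other => pairGt other (building[k]'hk)) =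
        building.countP (fun y => decide (toLex (building[k]'hk) < toLex y)) := by
      rw [← hperm.countP_eq]
      refine List.countP_congr (fun a _ => ?_)
      rw [pairGt_eq_lt]
    rw [h1]
    exact countP_gt_of_pairwise (fun p => toLex p) building hstrict k hk
  -- unfold both sides
  rw [solve, solve_alt]
  simp only [← hkeys, ← hbuilding, ← hf]
  have h0 := loopA_eq_loopE building 0 (List.replicate (n + 1).toNat (0 : Int)) 0
  norm_num at h0
  rw [h0, loopE_eq]
  set es := PySem.List.enumerate building 0 with hes
  set ans0 := List.replicate (n + 1).toNat (0 : Int) with hans0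
  have hans0len : ans0.length = m + 1 := by
    rw [hans0, List.length_replicate]; omega
  -- membership facts about es
  have hsnd_es : ∀ e ∈ es, e.2 ∈ keys := by
    intro e he
    refine hperm.mem_iff.mp ?_
    have : e.2 ∈ es.map (fun x => x.2) := List.mem_map_of_mem he
    rwa [hes, PySem.List.map_snd_enumerate] at this
  have hkeys_shape : ∀ y ∈ keys, ∃ j : Nat, j < m ∧ y = f (j : Int) := by
    intro y hy
    rw [hkeysN] at hy
    obtain ⟨j, hj, rfl⟩ := List.mem_map.mp hy
    exact ⟨j, List.mem_range.mp hj, rfl⟩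
  have hbound : ∀ e ∈ es, 0 ≤ e.2.2 ∧ e.2.2 < (ans0.length : Int) := by
    intro e he
    obtain ⟨j, hj, hej⟩ := hkeys_shape e.2 (hsnd_es e he)
    have : e.2.2 = (j : Int) + 1 := by rw [hej]
    rw [this, hans0len]
    omega
  have hnd_es : (es.map (fun e => e.2.2)).Nodup := by
    have h1 : es.map (fun e => e.2.2) = building.map (fun y => y.2) := by
      rw [hes]
      calc (PySem.List.enumerate building 0).map (fun e => e.2.2)
          = ((PySem.List.enumerate building 0).map (fun e => e.2)).map (fun y => y.2) := by
            rw [List.map_map]; rfl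
        _ = building.map (fun y => y.2) := by rw [PySem.List.map_snd_enumerate]
    rw [h1]
    exact ((hperm.map (fun y => y.2)).nodup_iff).mpr hsndnodup
  -- the two components
  congr 1
  -- cost
  · have hmapF : es.map (fun e => e.2.1 * 2 * (PySem.Int.floordiv e.1 2 + 1)) =
        building.map (fun y => y.1 * 2 * (PySem.Int.floordiv ((R y : Nat) : Int) 2 + 1)) := by
      rw [hes]
      have h00 : (0 : Int) = ((0 : Nat) : Int) := rfl
      rw [h00]
      refine map_enumerate_congr
        (fun k y => y.1 * 2 * (PySem.Int.floordiv k 2 + 1))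
        (fun y => y.1 * 2 * (PySem.Int.floordiv ((R y : Nat) : Int) 2 + 1))
        building 0 (fun k hk => ?_)
      simp only [Nat.zero_add, hrank k hk]
    have hzip := @List.zip_map' _ _ _ id (fun k => ((R k : Nat) : Int)) keys
    rw [List.map_id] at hzip
    have hzip2 : ((keys.zip (keys.map (fun k => ((R k : Nat) : Int)))).map
        (fun p => p.1.1 * (PySem.Int.floordiv p.2 2 + 1))) =
        keys.map (fun y => y.1 * (PySem.Int.floordiv ((R y : Nat) : Int) 2 + 1)) := by
      rw [hzip, List.map_map]
      rfl
    rw [zero_add, hmapF, (hperm.map _).sum_eq, hzip2, ← List.sum_map_mul_left]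
    exact congrArg List.sum (List.map_congr_left (fun y _ => by ring))
  -- answer list
  · have hposm : ∀ (r : Int),
        (if PySem.Int.mod r 2 = 0 then PySem.Int.floordiv r 2 + 1
         else -(PySem.Int.floordiv r 2 + 1)) = posOf r := fun r => rfl
    refine List.ext_getElem? (fun j => ?_)
    rcases Nat.lt_or_ge j (m + 1) with hj | hj
    · cases j with
      | zero =>
        rw [scatter_untouched 0 es ans0 (fun e he => (hbound e he).1) ?_]
        · have hT : (n + 1).toNat = m + 1 := by omega
          rw [hans0, hT]
          simp
        · intro e he
          obtain ⟨jj, hjj, hej⟩ := hkeys_shape e.2 (hsnd_es e he)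
          have : e.2.2 = (jj : Int) + 1 := by rw [hej]
          omega
      | succ i =>
        have him : i < m := by omega
        have hikey : i < keys.length := by omega
        have hmem : keys[i]'hikey ∈ building := hperm.mem_iff.mpr (List.getElem_mem hikey)
        obtain ⟨k, hk, hbk⟩ := List.mem_iff_getElem.mp hmem
        have he : ((k : Int), keys[i]'hikey) ∈ es := by
          rw [hes, PySem.List.mem_enumerate_iff]
          exact ⟨k, hk, by rw [hbk]; norm_num⟩
        have hsnd : (keys[i]'hikey).2 = ((i + 1 : Nat) : Int) := by
          rw [hkeyget i him, hf]
          push_cast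
          ring
        rw [scatter_hit (i + 1) es ans0 ((k : Int), keys[i]'hikey) he hsnd hnd_es hbound]
        have hki : k = R (keys[i]'hikey) := by
          have := hrank k hk
          rw [hbk] at this
          omega
        simp only [List.getElem?_cons_succ, List.getElem?_map]
        rw [List.getElem?_eq_getElem hikey]
        simp only [Option.map_some]
        rw [hposm, hki]
    · -- out of range on both sides
      rw [List.getElem?_eq_none, List.getElem?_eq_none]
      · simp only [List.length_cons, List.length_map]
        omega
      · rw [scatter_length, hans0len]
        omega

-- ===== VERDICT (by name: the statement is the Claim_ definition above) =====
theorem solve_spec : Claim_equal_solve := by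
  intro n visits _ hpre
  exact solve_eq_alt n visits hpre.1
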